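-- pv_equiv track=rewrite | github.com/JEEEUN-LEE/Coding-Practice | D258_Python.py | solution
-- ===== SOURCE A (Python) =====
-- def solution(k, m, score):
--     score.sort(reverse = True)
--     result = 0
--     for i in range(0, len(score), m):
--         box = score[i:i+m]
--         if len(box) == m:
--             result += min(box) * m
--     return result
-- ===== SOURCE B (Python) =====
-- def solution(k, m, score):
--     # Count copies of each value in a dict; for each distinct value, compute by
--     # ceiling arithmetic how many box-minimum positions (r, r+m, r+2m, ... in
--     # ascending order, r = len % m) land inside that value's block of equal
--     # elements -- no scan of a sorted array, no slicing, no min().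
--     if m <= 0:
--         return 0
--     counts = {}
--     for v in score:
--         counts[v] = counts.get(v, 0) + 1
--     r = len(score) % m
--
--     def nmins(x):
--         # number of box-minimum positions strictly below ascending position x
--         return max(0, -((r - x) // m))
--
--     total = 0
--     pos = 0
--     for v in sorted(counts):
--         c = counts[v]
--         total += (nmins(pos + c) - nmins(pos)) * v
--         pos += c
--     return m * total
-- ===== Notes on version B (the rewrite author's own statement) =====
-- stated objective: alternative
-- what changed: A sorts descending and scans the array slicing each m-box and taking min(); B never touches a sorted array of elements at all: it builds a dict of value counts, sorts only the distinct values, and for each value computes by ceiling arithmetic how many box-minimum positions fall inside that value's block, summing count*value.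
import Mathlib
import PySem

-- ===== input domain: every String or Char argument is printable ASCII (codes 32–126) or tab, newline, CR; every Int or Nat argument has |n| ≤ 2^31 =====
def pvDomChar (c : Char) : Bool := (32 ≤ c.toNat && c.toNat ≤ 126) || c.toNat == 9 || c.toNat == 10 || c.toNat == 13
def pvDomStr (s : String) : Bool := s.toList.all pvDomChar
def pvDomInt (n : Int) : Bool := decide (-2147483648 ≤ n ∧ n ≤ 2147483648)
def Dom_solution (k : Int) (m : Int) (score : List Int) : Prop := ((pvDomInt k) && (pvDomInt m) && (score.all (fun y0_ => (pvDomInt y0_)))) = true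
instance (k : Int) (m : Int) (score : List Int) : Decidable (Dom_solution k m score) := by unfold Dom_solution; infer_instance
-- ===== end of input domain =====

-- B replaces A's sort-slice-min scan by a value-counting dict: it sorts only the
-- distinct values and counts, per value, by ceiling arithmetic how many box-minimum
-- positions fall inside that value's block.  Python A sorts `score` in place
-- (descending); B does not mutate it: the equivalence proved here is about the
-- RETURN value only.

-- ===== PORT A =====
def solution (k : Int) (m : Int) (score : List Int) : Int :=
  let d := PySem.List.sorted score (fun x => x) true
  (PySem.List.pyRange 0 (d.length : Int) m).foldl
    (fun result i =>
      let box := PySem.List.slice d (some i) (some (i + m))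
      if (box.length : Int) = m then
        -- when this branch runs (with m ≠ 0) box is nonempty, so min? is `some` and
        -- the `getD 0` is exact: it is Python's min(box)
        result + ((PySem.List.min? box (fun y => y)).getD 0) * m
      else result) 0

-- ===== PORT B =====
def solution_alt (k : Int) (m : Int) (score : List Int) : Int :=
  if m ≤ 0 then 0
  else
    let counts := PySem.Dict.counter score
    let r := PySem.Int.mod (score.length : Int) m
    -- nmins x = number of box-minimum positions strictly below ascending position x
    let nmins : Int → Int := fun x => max 0 (-(PySem.Int.floordiv (r - x) m))
    let res := (PySem.List.sorted counts.keys (fun v => v) false).foldl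
      (fun s v =>
        let c := counts.getD v 0
        (s.1 + (nmins (s.2 + c) - nmins s.2) * v, s.2 + c)) (0, 0)
    m * res.1

-- ===== PRECONDITION & SPEC =====
-- Pre_ excludes only m = 0, where Python's range(..., 0) raises ValueError in A.
def Pre_solution (k : Int) (m : Int) (score : List Int) : Prop := m ≠ 0
instance (k : Int) (m : Int) (score : List Int) : Decidable (Pre_solution k m score) := by unfold Pre_solution; infer_instance
def pvWitness_solution : Int × Int × List Int := (0, 2, [5, 1, 3])

def Spec_solution (k : Int) (m : Int) (score : List Int) (out : Int) : Prop := out = solution_alt k m score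
instance (k : Int) (m : Int) (score : List Int) (out : Int) : Decidable (Spec_solution k m score out) := by unfold Spec_solution; infer_instance

-- ===== CLAIM (what is proved, stated in full; the proofs are below) =====
def Claim_equal_solution : Prop := ∀ (k : Int) (m : Int) (score : List Int), Dom_solution k m score → Pre_solution k m score → Spec_solution k m score (solution k m score)

-- ===== LEMMAS AND PROOFS =====

def gA (d : List Int) (m i : Int) : Int :=
  if ((PySem.List.slice d (some i) (some (i + m))).length : Int) = m then
    ((PySem.List.min? (PySem.List.slice d (some i) (some (i + m))) (fun y => y)).getD 0) * m
  else 0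

theorem ite_add_form (c : Prop) [Decidable c] (r x : Int) :
    (if c then r + x else r) = r + (if c then x else 0) := by
  split <;> simp

theorem sorted_rev_eq_reverse (xs : List Int) :
    PySem.List.sorted xs (fun x => x) true = (PySem.List.sorted xs (fun x => x) false).reverse := by
  apply List.Perm.eq_of_pairwise (le := fun a b : Int => b ≤ a)
  · exact fun a b _ _ h1 h2 => le_antisymm h2 h1
  · exact PySem.List.sorted_pairwise_rev xs (fun x => x)
  · exact List.pairwise_reverse.2 (PySem.List.sorted_pairwise xs (fun x => x))
  · exact (PySem.List.sorted_perm xs (fun x => x) true).trans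
      ((PySem.List.sorted_perm xs (fun x => x) false).symm.trans
        (List.reverse_perm _).symm)

theorem min_of_desc (l : List Int) (hl : l ≠ [])
    (hp : l.Pairwise (fun x y : Int => y ≤ x)) :
    PySem.List.min? l (fun y => y) = some (l.getD (l.length - 1) 0) := by
  have hlen : 0 < l.length := List.length_pos_iff.2 hl
  cases h : PySem.List.min? l (fun y => y) with
  | none => exact absurd ((PySem.List.min?_eq_none_iff l _).1 h) hl
  | some v =>
    have hmem := PySem.List.min?_mem h
    have hmin := PySem.List.min?_isMin h
    have hlast : l.getD (l.length - 1) 0 = l[l.length - 1]'(by omega) :=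
      List.getD_eq_getElem l 0 (by omega)
    have hlast_min : ∀ y ∈ l, l[l.length - 1]'(by omega) ≤ y := by
      intro y hy
      obtain ⟨i, hi, rfl⟩ := List.mem_iff_getElem.1 hy
      rcases Nat.lt_or_ge i (l.length - 1) with hlt | hge
      · exact List.pairwise_iff_getElem.1 hp i (l.length - 1) hi (by omega) hlt
      · have : i = l.length - 1 := by omega
        subst this; exact le_refl _
    have h1 : v ≤ l[l.length - 1]'(by omega) :=
      hmin _ (List.getElem_mem _)
    have h2 : l[l.length - 1]'(by omega) ≤ v := hlast_min v hmem
    rw [hlast]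
    exact congrArg some (le_antisymm h1 h2)

theorem A_sum (kk : Int) (M : Nat) (hM : 0 < M) (score : List Int) :
    solution kk (M : Int) score =
      ((List.range ((PySem.List.sorted score (fun x => x) false).length / M)).map
        (fun j : Nat =>
          ((PySem.List.sorted score (fun x => x) false).getD
            ((PySem.List.sorted score (fun x => x) false).length - (j + 1) * M) 0) * (M : Int))).sum := by
  set m : Int := (M : Int) with hMm
  have hm : 0 < m := by rw [hMm]; exact_mod_cast hM
  set a := PySem.List.sorted score (fun x => x) false with ha
  set n := a.length with hn
  have hMpos : 0 < M := hM
  have hd : PySem.List.sorted score (fun x => x) true = a.reverse := sorted_rev_eq_reverse score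
  have hdlen : (PySem.List.sorted score (fun x => x) true).length = n := by
    rw [hd, List.length_reverse]
  have hdesc : (a.reverse).Pairwise (fun x y : Int => y ≤ x) :=
    List.pairwise_reverse.2 (PySem.List.sorted_pairwise score (fun x => x))
  set q : Nat := n / M with hq
  have hfull : ∀ j : Nat, j < q → (j + 1) * M ≤ n := by
    intro j hj
    have h1 : j + 1 ≤ n / M := by rw [hq] at hj; omega
    exact (Nat.le_div_iff_mul_le hMpos).mp h1
  have hnotfull : ∀ j : Nat, q ≤ j → n < j * M + M := by
    intro j hj
    have h1 : n / M < j + 1 := by rw [hq] at hj; omega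
    have h2 := (Nat.div_lt_iff_lt_mul hMpos).mp h1
    have h3 : (j + 1) * M = j * M + M := by ring
    omega
  set Q : Nat := (n + M - 1) / M with hQ
  have hqQ : q ≤ Q := by
    rw [hq, hQ]
    have hle : n ≤ n + M - 1 := by omega
    exact Nat.div_le_div_right hle
  have hrangeA : PySem.List.pyRange 0 (n : Int) m =
      List.map (fun j : Nat => 0 + m * (j : Int)) (List.range Q) := by
    have hcount : (if (0:Int) < (n:Int) then (((n:Int) - 0 + m - 1) / m).toNat else 0) = Q := by
      rcases Nat.eq_zero_or_pos n with h0 | h0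
      · rw [if_neg (by simp [h0]), hQ, h0]
        exact (Nat.div_eq_of_lt (by omega)).symm
      · rw [if_pos (by exact_mod_cast h0)]
        have hcast : (n : Int) - 0 + m - 1 = ((n + M - 1 : Nat) : Int) := by
          rw [hMm]; push_cast [Nat.cast_sub (by omega : 1 ≤ n + M)]; ring
        rw [hcast, hMm, ← Int.natCast_div, Int.toNat_natCast, hQ]
    rw [PySem.List.pyRange_of_pos 0 (n : Int) hm, hcount]
  have hA : solution kk m score =
      ((List.range Q).map (fun j : Nat =>
        gA (a.reverse) m (0 + m * (j : Int)))).sum := by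
    show (PySem.List.pyRange 0 ((PySem.List.sorted score (fun x => x) true).length : Int) m).foldl
      _ 0 = _
    rw [hdlen, hrangeA, List.foldl_map]
    have hbody : (fun (result : Int) (j : Nat) =>
        (fun result i =>
          if ((PySem.List.slice (PySem.List.sorted score (fun x => x) true) (some i) (some (i + m))).length : Int) = m then
            result + ((PySem.List.min? (PySem.List.slice (PySem.List.sorted score (fun x => x) true) (some i) (some (i + m))) (fun y => y)).getD 0) * m
          else result) result (0 + m * (j : Int))) =
        (fun (result : Int) (j : Nat) => result + gA (a.reverse) m (0 + m * (j : Int))) := by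
      funext result j
      beta_reduce
      simp only [gA]
      rw [hd]
      exact ite_add_form _ _ _
    rw [hbody, PySem.List.foldl_add, zero_add]
  have hterm : ∀ j : Nat, j < q →
      gA (a.reverse) m (0 + m * (j : Int)) = (a.getD (n - (j + 1) * M) 0) * m := by
    intro j hj
    have hjM : (j + 1) * M ≤ n := hfull j hj
    have hidx : 0 + m * (j : Int) = ((M * j : Nat) : Int) := by rw [hMm]; push_cast; ring
    have hidx2 : 0 + m * (j : Int) + m = ((M * j + M : Nat) : Int) := by rw [hMm]; push_cast; ring
    have hbox : PySem.List.slice (a.reverse) (some (0 + m * (j : Int))) (some (0 + m * (j : Int) + m)) =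
        List.take M (List.drop (M * j) a.reverse) := by
      rw [hidx2, hidx, PySem.List.slice_natCast]
      congr 1; omega
    have hrevlen : a.reverse.length = n := by rw [List.length_reverse]
    have hboxlen : (List.take M (List.drop (M * j) a.reverse)).length = M := by
      rw [List.length_take, List.length_drop, hrevlen]
      have : M * j + M ≤ n := by nlinarith
      omega
    have hboxne : List.take M (List.drop (M * j) a.reverse) ≠ [] := by
      intro h; rw [h] at hboxlen; simp at hboxlen; omega
    have hboxdesc : (List.take M (List.drop (M * j) a.reverse)).Pairwise (fun x y : Int => y ≤ x) :=
      List.Pairwise.sublist ((List.take_sublist _ _).trans (List.drop_sublist _ _)) hdesc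
    rw [gA, hbox, if_pos (by rw [hboxlen, hMm])]
    rw [min_of_desc _ hboxne hboxdesc, Option.getD_some]
    have hMn : M * j + M ≤ n := by nlinarith
    have hsub : n - (j + 1) * M = n - (M * j + M) := by
      have : (j + 1) * M = M * j + M := by ring
      omega
    have hget : (List.take M (List.drop (M * j) a.reverse)).getD
        ((List.take M (List.drop (M * j) a.reverse)).length - 1) 0 =
        a.getD (n - (j + 1) * M) 0 := by
      rw [hboxlen, List.getD_eq_getElem _ _ (by rw [hboxlen]; omega : M - 1 < (List.take M (List.drop (M * j) a.reverse)).length),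
        List.getElem_take, List.getElem_drop]
      rw [List.getElem_reverse]
      rw [List.getD_eq_getElem a 0 (by rw [← hn, hsub]; omega : n - (j + 1) * M < a.length)]
      congr 1
      rw [hsub]
      have hlen : a.length = n := hn.symm
      omega
    rw [hget]
  have hzero : ∀ j : Nat, q ≤ j → gA (a.reverse) m (0 + m * (j : Int)) = 0 := by
    intro j hj
    have hlt : n < M * j + M := by
      have := hnotfull j hj
      have h3 : j * M = M * j := by ring
      omega
    have hidx : 0 + m * (j : Int) = ((M * j : Nat) : Int) := by rw [hMm]; push_cast; ring
    have hidx2 : 0 + m * (j : Int) + m = ((M * j + M : Nat) : Int) := by rw [hMm]; push_cast; ring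
    have hrevlen : a.reverse.length = n := by rw [List.length_reverse]
    rw [gA, if_neg]
    rw [hidx2, hidx, PySem.List.slice_natCast]
    have : (List.take (M * j + M - M * j) (List.drop (M * j) a.reverse)).length =
        min (M * j + M - M * j) (n - M * j) := by
      rw [List.length_take, List.length_drop, hrevlen]
    rw [this, hMm]
    intro hcontra
    have : min (M * j + M - M * j) (n - M * j) = M := by exact_mod_cast hcontra
    omega
  rw [hA]
  have hsplit : List.range Q = List.range q ++ (List.range (Q - q)).map (fun x => q + x) := by
    rw [← List.range_add]; congr 1; omega
  rw [hsplit, List.map_append, List.sum_append]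
  have hz : (((List.range (Q - q)).map (fun x => q + x)).map
      (fun j : Nat => gA (a.reverse) m (0 + m * (j : Int)))).sum = 0 := by
    apply List.sum_eq_zero
    intro x hx
    simp only [List.map_map, List.mem_map, Function.comp] at hx
    obtain ⟨y, _, rfl⟩ := hx
    exact hzero _ (by omega)
  simp only [List.map_map] at hz ⊢
  rw [hz, add_zero]
  exact congrArg List.sum (List.map_congr_left (fun j hj => hterm j (List.mem_range.1 hj)))

def gB (M r x : Nat) : Nat := (x - r + M - 1) / M

theorem lt_gB_iff (M r : Nat) (hM : 0 < M) (j x : Nat) :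
    r + j * M < x ↔ j < gB M r x := by
  unfold gB
  rw [show (j < (x - r + M - 1) / M) ↔ (j + 1 ≤ (x - r + M - 1) / M) from Iff.rfl,
    Nat.le_div_iff_mul_le hM, add_mul, one_mul]
  generalize j * M = t
  omega

theorem gB_mono (M r : Nat) {x y : Nat} (h : x ≤ y) : gB M r x ≤ gB M r y :=
  Nat.div_le_div_right (by omega)

theorem nm_eq (M r : Nat) (hM : 0 < M) (x : Nat) :
    max 0 (-(PySem.Int.floordiv ((r : Int) - (x : Int)) (M : Int))) = (gB M r x : Int) := by
  rcases Nat.lt_or_ge r x with hrx | hxr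
  · have h1 : (r : Int) - (x : Int) = -(((x - r : Nat) : Int)) := by
      push_cast [Nat.cast_sub (le_of_lt hrx)]; ring
    set y : Nat := x - r with hy
    have hy0 : 0 < y := by omega
    set d : Nat := (y + M - 1) / M with hd
    have hdm := Nat.div_add_mod (y + M - 1) M
    rw [← hd] at hdm
    have hmlt := Nat.mod_lt (y + M - 1) hM
    have hgb : gB M r x = d := by unfold gB; rw [hd]
    have h2 : y ≤ M * d := by omega
    have hC : M * d + 1 ≤ y + M := by omega
    have hceil : -(PySem.Int.floordiv (-(y : Int)) (M : Int)) = (d : Int) := by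
      rw [PySem.Int.neg_floordiv_neg_eq_iff_of_pos (by exact_mod_cast hM)]
      constructor
      · have h3 : ((d:Int) - 1) * M = (M:Int) * d - M := by ring
        rw [h3]
        have h4 : ((M * d : Nat) : Int) + 1 ≤ ((y + M : Nat) : Int) := by exact_mod_cast hC
        push_cast at h4
        omega
      · have h5 : ((y : Nat) : Int) ≤ ((M * d : Nat) : Int) := by exact_mod_cast h2
        push_cast at h5
        calc (y : Int) ≤ (M : Int) * d := h5
          _ = (d : Int) * M := by ring
    rw [h1, hceil, hgb]
    exact max_eq_right (Int.natCast_nonneg d)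
  · have h1 : (r : Int) - (x : Int) = ((r - x : Nat) : Int) := by
      push_cast [Nat.cast_sub hxr]; ring
    have h2 : gB M r x = 0 := by
      unfold gB
      have hz : x - r = 0 := by omega
      rw [hz, Nat.zero_add, Nat.div_eq_of_lt (by omega)]
    rw [h1, PySem.Int.floordiv_natCast, h2, Nat.cast_zero]
    exact max_eq_left (neg_nonpos.mpr (Int.natCast_nonneg _))

theorem sorted_run_decomp (v : Int) (b : List Int) (hb : b.Pairwise (· ≤ ·))
    (hmin : ∀ y ∈ b, v ≤ y) :
    b = List.replicate (b.count v) v ++ b.filter (fun y => y ≠ v) := by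
  induction b with
  | nil => simp
  | cons x t ih =>
    have hxt : ∀ y ∈ t, x ≤ y := (List.pairwise_cons.1 hb).1
    have ht : t.Pairwise (· ≤ ·) := (List.pairwise_cons.1 hb).2
    by_cases hx : x = v
    · subst hx
      rw [List.count_cons_self]
      have hfil : (x :: t).filter (fun y => decide (y ≠ x)) = t.filter (fun y => decide (y ≠ x)) := by
        simp
      rw [hfil, List.replicate_succ, List.cons_append]
      exact congrArg (x :: ·) (ih ht hxt)
    · have hnv : v ∉ x :: t := by
        intro hv
        rcases List.mem_cons.1 hv with h | hv'
        · exact hx h.symm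
        · have h1 : x ≤ v := hxt v hv'
          have h2 : v ≤ x := hmin x (by simp)
          exact hx (le_antisymm h1 h2)
      rw [List.count_eq_zero.2 hnv, List.replicate_zero, List.nil_append]
      rw [List.filter_eq_self.2]
      intro y hy
      simp only [ne_eq, decide_eq_true_eq]
      intro he; subst he; exact hnv hy

theorem fold_runs (M r : Nat) (hM : 0 < M) (cnt : Int → Int) :
    ∀ (ks b : List Int) (p : Nat) (tot : Int),
      ks.Pairwise (· < ·) →
      b.Pairwise (· ≤ ·) →
      (∀ w : Int, w ∈ ks ↔ w ∈ b) →
      (∀ w ∈ ks, cnt w = (b.count w : Int)) →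
      (ks.foldl (fun s v =>
          (s.1 + (max 0 (-(PySem.Int.floordiv ((r : Int) - (s.2 + cnt v)) (M : Int))) -
                  max 0 (-(PySem.Int.floordiv ((r : Int) - s.2) (M : Int)))) * v,
           s.2 + cnt v)) (tot, (p : Int))).1
        = tot + ∑ j ∈ Finset.Ico (gB M r p) (gB M r (p + b.length)), b.getD (r + j * M - p) 0 := by
  intro ks
  induction ks with
  | nil =>
    intro b p tot _ _ hmem _
    have hb0 : b = [] := List.eq_nil_iff_forall_not_mem.2 (fun w hw => by simpa using (hmem w).2 hw)
    subst hb0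
    simp
  | cons v ks' ih =>
    intro b p tot hks hb hmem hcnt
    have hvlt : ∀ w ∈ ks', v < w := (List.pairwise_cons.1 hks).1
    have hks' : ks'.Pairwise (· < ·) := (List.pairwise_cons.1 hks).2
    have hvb : v ∈ b := (hmem v).1 (by simp)
    have hminb : ∀ y ∈ b, v ≤ y := by
      intro y hy
      rcases List.mem_cons.1 ((hmem y).2 hy) with h | h
      · exact le_of_eq h.symm
      · exact le_of_lt (hvlt y h)
    set c : Nat := b.count v with hc
    have hc0 : 0 < c := List.count_pos_iff.2 hvb
    set b' : List Int := b.filter (fun y => decide (y ≠ v)) with hb'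
    have hdecomp : b = List.replicate c v ++ b' := sorted_run_decomp v b hb hminb
    have hb'sorted : b'.Pairwise (· ≤ ·) := List.Pairwise.sublist List.filter_sublist hb
    have hvb' : v ∉ b' := by
      intro h
      have := (List.mem_filter.1 h).2
      simp at this
    have hmem' : ∀ w : Int, w ∈ ks' ↔ w ∈ b' := by
      intro w
      constructor
      · intro hw
        have hwb : w ∈ b := (hmem w).1 (List.mem_cons_of_mem _ hw)
        refine List.mem_filter.2 ⟨hwb, ?_⟩
        simp only [ne_eq, decide_eq_true_eq]
        exact ne_of_gt (hvlt w hw)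
      · intro hw
        have hwb : w ∈ b := (List.mem_filter.1 hw).1
        rcases List.mem_cons.1 ((hmem w).2 hwb) with h | h
        · exact absurd (h ▸ hw) hvb'
        · exact h
    have hcnt' : ∀ w ∈ ks', cnt w = (b'.count w : Int) := by
      intro w hw
      have hwv : w ≠ v := ne_of_gt (hvlt w hw)
      have h1 : cnt w = (b.count w : Int) := hcnt w (List.mem_cons_of_mem _ hw)
      have h2 : b.count w = b'.count w := by
        conv_lhs => rw [hdecomp]
        rw [List.count_append, List.count_replicate]
        simp [hwv.symm]
      rw [h1, h2]
    have hlen : b.length = c + b'.length := by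
      conv_lhs => rw [hdecomp]
      rw [List.length_append, List.length_replicate]
    have hcv : cnt v = (c : Nat) := hcnt v (by simp)
    -- unfold one fold step
    rw [List.foldl_cons]
    have hstate : ((tot, (p : Int)).1 +
          (max 0 (-(PySem.Int.floordiv ((r : Int) - ((tot, (p : Int)).2 + cnt v)) (M : Int))) -
           max 0 (-(PySem.Int.floordiv ((r : Int) - (tot, (p : Int)).2) (M : Int)))) * v,
         (tot, (p : Int)).2 + cnt v) =
        ((tot + ((gB M r (p + c) : Int) - (gB M r p : Int)) * v), ((p + c : Nat) : Int)) := by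
      rw [hcv]
      have h1 : (p : Int) + (c : Int) = ((p + c : Nat) : Int) := by push_cast; ring
      rw [h1, nm_eq M r hM (p + c), nm_eq M r hM p]
    rw [hstate]
    rw [ih b' (p + c) _ hks' hb'sorted hmem' hcnt']
    -- now combine the sums
    have hm1 : gB M r p ≤ gB M r (p + c) := gB_mono M r (by omega)
    have hm2 : gB M r (p + c) ≤ gB M r (p + c + b'.length) := gB_mono M r (by omega)
    have hlen2 : p + b.length = p + c + b'.length := by omega
    rw [hlen2]
    rw [← Finset.sum_Ico_consecutive _ hm1 hm2]
    have hchunk1 : ∀ j ∈ Finset.Ico (gB M r p) (gB M r (p + c)), b.getD (r + j * M - p) 0 = v := by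
      intro j hj
      rcases Finset.mem_Ico.1 hj with ⟨hj1, hj2⟩
      have hge : p ≤ r + j * M := by
        by_contra hcon
        exact absurd ((lt_gB_iff M r hM j p).1 (by omega)) (by omega)
      have hlt : r + j * M < p + c := (lt_gB_iff M r hM j (p + c)).2 hj2
      have hidx : r + j * M - p < c := by omega
      conv_lhs => rw [hdecomp]
      rw [List.getD_append _ _ _ _ (by rw [List.length_replicate]; exact hidx)]
      rw [List.getD_eq_getElem _ _ (by rw [List.length_replicate]; exact hidx)]
      exact List.getElem_replicate _
    have hchunk2 : ∀ j ∈ Finset.Ico (gB M r (p + c)) (gB M r (p + c + b'.length)),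
        b.getD (r + j * M - p) 0 = b'.getD (r + j * M - (p + c)) 0 := by
      intro j hj
      rcases Finset.mem_Ico.1 hj with ⟨hj1, hj2⟩
      have hge : p + c ≤ r + j * M := by
        by_contra hcon
        exact absurd ((lt_gB_iff M r hM j (p + c)).1 (by omega)) (by omega)
      conv_lhs => rw [hdecomp]
      rw [List.getD_append_right _ _ _ _ (by rw [List.length_replicate]; omega)]
      rw [List.length_replicate]
      congr 1
      omega
    rw [Finset.sum_congr rfl hchunk1, Finset.sum_congr rfl hchunk2]
    rw [Finset.sum_const, Nat.card_Ico, nsmul_eq_mul]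
    have hcast : ((gB M r (p + c) - gB M r p : Nat) : Int) = (gB M r (p + c) : Int) - (gB M r p : Int) :=
      by push_cast [Nat.cast_sub hm1]; ring
    rw [hcast]
    ring

theorem B_sum (kk : Int) (M : Nat) (hM : 0 < M) (score : List Int) :
    solution_alt kk (M : Int) score =
      (M : Int) * ∑ j ∈ Finset.range ((PySem.List.sorted score (fun x => x) false).length / M),
        (PySem.List.sorted score (fun x => x) false).getD
          ((PySem.List.sorted score (fun x => x) false).length % M + j * M) 0 := by
  set a := PySem.List.sorted score (fun x => x) false with ha
  set n := a.length with hn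
  set q : Nat := n / M with hq
  set r : Nat := n % M with hr
  have hlen_score : score.length = n := by
    rw [hn, ha, (PySem.List.sorted_perm score (fun x => x) false).length_eq]
  set counts := PySem.Dict.counter (κ := Int) score with hcounts
  set ks := PySem.List.sorted counts.keys (fun v => v) false with hks
  have hkeys : counts.keys = PySem.Set.ofList score := PySem.Dict.keys_counter score
  have hks_perm : ks.Perm (PySem.Set.ofList score) := by
    rw [hks, hkeys]; exact PySem.List.sorted_perm _ _ _
  have hks_nodup : ks.Nodup := hks_perm.nodup_iff.2 (PySem.Set.nodup_ofList score)
  have hks_le : ks.Pairwise (· ≤ ·) := PySem.List.sorted_pairwise _ _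
  have hks_lt : ks.Pairwise (· < ·) := by
    have := hks_le.and hks_nodup
    exact this.imp (fun h => lt_of_le_of_ne h.1 h.2)
  have ha_le : a.Pairwise (· ≤ ·) := PySem.List.sorted_pairwise _ _
  have hmem : ∀ w : Int, w ∈ ks ↔ w ∈ a := by
    intro w
    rw [hks_perm.mem_iff, PySem.Set.mem_ofList,
      (PySem.List.sorted_perm score (fun x => x) false).mem_iff]
  have hcntf : ∀ w ∈ ks, counts.getD w 0 = (a.count w : Int) := by
    intro w _
    rw [hcounts, PySem.Dict.getD_counter]
    exact_mod_cast ((PySem.List.sorted_perm score (fun x => x) false).count_eq w).symm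
  have hrport : PySem.Int.mod (score.length : Int) (M : Int) = (r : Int) := by
    rw [hlen_score, PySem.Int.mod_natCast]
  show (if (M : Int) ≤ 0 then 0 else _) = _
  rw [if_neg (by
    have h0 : (0 : Int) < (M : Int) := by exact_mod_cast hM
    omega)]
  have hgB0 : gB M r 0 = 0 := by
    unfold gB
    have hz : 0 - r = 0 := by omega
    rw [hz, Nat.zero_add, Nat.div_eq_of_lt (by omega)]
  have hdm := Nat.div_add_mod n M
  have hgBn : gB M r n = q := by
    unfold gB
    have hz : n - r + M - 1 = M * q + (M - 1) := by
      rw [hq, hr]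
      omega
    rw [hz, Nat.mul_add_div hM, Nat.div_eq_of_lt (by omega), Nat.add_zero]
  rw [show (PySem.Int.mod (score.length : Int) (M : Int)) = (r : Int) from hrport]
  rw [show ((0 : Int), (0 : Int)) = ((0 : Int), ((0 : Nat) : Int)) by norm_num]
  show (M : Int) * ((PySem.List.sorted counts.keys (fun v => v) false).foldl
      (fun s v =>
        (s.1 + (max 0 (-(PySem.Int.floordiv ((r : Int) - (s.2 + counts.getD v 0)) (M : Int))) -
                max 0 (-(PySem.Int.floordiv ((r : Int) - s.2) (M : Int)))) * v,
         s.2 + counts.getD v 0)) ((0 : Int), ((0 : Nat) : Int))).1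
    = (M : Int) * ∑ j ∈ Finset.range q, a.getD (r + j * M) 0
  rw [← hks, fold_runs M r hM (fun v => counts.getD v 0) ks a 0 0 hks_lt ha_le hmem hcntf]
  rw [Nat.zero_add, hgBn, hgB0, zero_add, ← Finset.range_eq_Ico]
  refine congrArg (fun t => (M : Int) * t) (Finset.sum_congr rfl (fun j _ => ?_))
  rw [Nat.sub_zero]

theorem solution_eq_of_pos (kk m : Int) (score : List Int) (hm : 0 < m) :
    solution kk m score = solution_alt kk m score := by
  obtain ⟨M, rfl⟩ : ∃ M : Nat, m = (M : Int) := ⟨m.toNat, (Int.toNat_of_nonneg (by omega)).symm⟩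
  have hM : 0 < M := by exact_mod_cast hm
  rw [A_sum kk M hM score, B_sum kk M hM score]
  set a := PySem.List.sorted score (fun x => x) false with ha
  set n := a.length with hn
  set q := n / M with hq
  set r := n % M with hr
  have hdm := Nat.div_add_mod n M
  rw [← hq, ← hr] at hdm
  have hlist : ((List.range q).map (fun j : Nat => a.getD (n - (j + 1) * M) 0 * (M : Int))).sum
      = ∑ j ∈ Finset.range q, a.getD (n - (j + 1) * M) 0 * (M : Int) := rfl
  have key : ∑ j ∈ Finset.range q, a.getD (n - (j + 1) * M) 0 * (M : Int)
      = ∑ j ∈ Finset.range q, a.getD (r + j * M) 0 * (M : Int) := by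
    rw [← Finset.sum_range_reflect (fun j => a.getD (r + j * M) 0 * (M : Int)) q]
    refine Finset.sum_congr rfl (fun j hj => ?_)
    have hjq : j < q := Finset.mem_range.1 hj
    congr 2
    rw [Nat.sub_mul, Nat.sub_mul, one_mul, add_mul, one_mul]
    have hmul : j * M + M ≤ q * M := by
      have h := Nat.mul_le_mul_right M (by omega : j + 1 ≤ q)
      rwa [add_mul, one_mul] at h
    have hcomm : M * q = q * M := Nat.mul_comm M q
    omega
  rw [hlist, key, Finset.mul_sum]
  exact Finset.sum_congr rfl (fun j _ => mul_comm _ _)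

theorem solution_eq_of_neg (kk m : Int) (score : List Int) (hm : m < 0) :
    solution kk m score = solution_alt kk m score := by
  have hA : PySem.List.pyRange 0 ((PySem.List.sorted score (fun x => x) true).length : Int) m = [] := by
    rw [PySem.List.pyRange, if_neg (by omega : ¬ m = 0)]
    simp only
    rw [if_neg (by omega : ¬ (0:Int) < m), if_neg (by omega : ¬ ((PySem.List.sorted score (fun x => x) true).length : Int) < 0)]
    simp
  show (PySem.List.pyRange 0 ((PySem.List.sorted score (fun x => x) true).length : Int) m).foldl _ 0 = _
  rw [hA]
  show (0 : Int) = solution_alt kk m score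
  rw [solution_alt, if_pos (by omega : m ≤ 0)]

-- ===== VERDICT (by name: the statement is the Claim_ definition above) =====
theorem solution_spec : Claim_equal_solution := by
  intro k m score _dom hpre
  unfold Spec_solution
  rcases lt_or_gt_of_ne hpre with hm | hm
  · exact solution_eq_of_neg k m score hm
  · exact solution_eq_of_pos k m score hm
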